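-- pv_equiv track=rewrite | github.com/Meryembenaammi/Graph-CoT-Reasoning | encode_graph_text.py | edges_to_text
-- ===== SOURCE A (Python) =====
-- from collections import defaultdict
--
-- def edges_to_text(edges):
--     adj = defaultdict(list)
--     nodes = set()
--
--     # Sécurité : vérifier que edges est bien une liste de paires
--     for edge in edges:
--         if not isinstance(edge, list):
--             continue
--         if len(edge) != 2:
--             continue
--
--         u, v = edge
--         adj[u].append(v)
--         nodes.add(u)
--         nodes.add(v)
--
--     # Cas graphe vide
--     if not nodes:
--         return "Graph has no edges."
--
--     text_lines = []
--     for node in sorted(nodes):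
--         neighbors = adj[node] if node in adj else []
--         text_lines.append(f"Node {node} -> {neighbors}")
--
--     return "\n".join(text_lines)
-- ===== SOURCE B (Python) =====
-- def edges_to_text(edges):
--     # One validated pass to collect the node set; no adjacency dict.
--     nodes = set()
--     for edge in edges:
--         if isinstance(edge, list) and len(edge) == 2:
--             nodes.add(edge[0])
--             nodes.add(edge[1])
--
--     if not nodes:
--         return "Graph has no edges."
--
--     # Neighbors of each node recomputed by re-scanning the edge list
--     # with the same validation (order and duplicates preserved).
--     return "\n".join(
--         f"Node {node} -> {[e[1] for e in edges if isinstance(e, list) and len(e) == 2 and e[0] == node]}"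
--         for node in sorted(nodes)
--     )
-- ===== Notes on version B (the rewrite author's own statement) =====
-- stated objective: simpler
-- what changed: Drops the adjacency defaultdict entirely: B collects only the node set in one validated pass and recomputes each sorted node's neighbor list by a filtering re-scan of the edges, instead of building and looking up a dict.
import Mathlib
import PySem

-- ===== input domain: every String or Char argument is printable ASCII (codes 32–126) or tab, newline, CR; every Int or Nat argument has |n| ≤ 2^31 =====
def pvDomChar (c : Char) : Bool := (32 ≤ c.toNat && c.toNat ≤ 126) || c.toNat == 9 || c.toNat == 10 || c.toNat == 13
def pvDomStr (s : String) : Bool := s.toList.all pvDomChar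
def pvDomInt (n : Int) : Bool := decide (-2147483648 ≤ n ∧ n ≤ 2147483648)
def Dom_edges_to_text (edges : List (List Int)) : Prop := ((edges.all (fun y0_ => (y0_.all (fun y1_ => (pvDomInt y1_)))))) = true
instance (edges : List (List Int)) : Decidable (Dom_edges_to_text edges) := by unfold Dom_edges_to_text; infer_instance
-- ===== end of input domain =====

-- B drops A's adjacency defaultdict: it collects only the node set in one validated
-- pass and recomputes each node's neighbors by a filtering re-scan (objective: simpler).

-- shared f-string formatting helper: f"{neighbors}" for a list of ints
def listRepr (ns : List Int) : String :=
  "[" ++ PySem.Str.join ", " (ns.map PySem.Int.toStr) ++ "]"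

-- ===== PORT A =====
def edges_to_text (edges : List (List Int)) : String :=
  let st := edges.foldl
    (fun (p : PySem.Dict Int (List Int) × PySem.Set Int) edge =>
      match edge with
      | [u, v] => (p.1.modify u [] (· ++ [v]), PySem.Set.add (PySem.Set.add p.2 u) v)
      | _ => p)  -- len(edge) != 2: continue
    (PySem.Dict.empty, PySem.Set.empty)
  let adj := st.1
  let nodes := st.2
  if nodes = [] then "Graph has no edges."
  else
    let textLines := (PySem.List.sorted nodes (fun x => x) false).map
      (fun node =>
        let neighbors := if adj.contains node then adj.getD node [] else []
        "Node " ++ PySem.Int.toStr node ++ " -> " ++ listRepr neighbors)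
    PySem.Str.join "\n" textLines

-- ===== PORT B =====
-- B-side f-string formatting helper (B accesses edges by length test + indexing, not destructuring)
def listReprB (ns : List Int) : String :=
  "[" ++ PySem.Str.join ", " (ns.map PySem.Int.toStr) ++ "]"

def edges_to_text_alt (edges : List (List Int)) : String :=
  let nodes := edges.foldl
    (fun (s : PySem.Set Int) edge =>
      if edge.length = 2 then PySem.Set.add (PySem.Set.add s (edge.getD 0 0)) (edge.getD 1 0)
      else s)
    PySem.Set.empty
  if nodes = [] then "Graph has no edges."
  else
    PySem.Str.join "\n" ((PySem.List.sorted nodes (fun x => x) false).map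
      (fun node =>
        "Node " ++ PySem.Int.toStr node ++ " -> " ++
          listReprB (edges.filterMap (fun e =>
            if e.length = 2 ∧ e.getD 0 0 = node then some (e.getD 1 0) else none))))

-- ===== PRECONDITION & SPEC =====
def Spec_edges_to_text (edges : List (List Int)) (out : String) : Prop := out = edges_to_text_alt edges
instance (edges : List (List Int)) (out : String) : Decidable (Spec_edges_to_text edges out) := by unfold Spec_edges_to_text; infer_instance

-- ===== CLAIM (what is proved, stated in full; the proofs are below) =====
def Claim_equal_edges_to_text : Prop := ∀ (edges : List (List Int)), Dom_edges_to_text edges → Spec_edges_to_text edges (edges_to_text edges)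

-- ===== LEMMAS AND PROOFS =====

-- the set component of A's combined fold is exactly B's node-set fold
theorem snd_fold_eq (edges : List (List Int)) (d : PySem.Dict Int (List Int)) (s : PySem.Set Int) :
    (edges.foldl
      (fun (p : PySem.Dict Int (List Int) × PySem.Set Int) edge =>
        match edge with
        | [u, v] => (p.1.modify u [] (· ++ [v]), PySem.Set.add (PySem.Set.add p.2 u) v)
        | _ => p) (d, s)).2
    = edges.foldl
      (fun (t : PySem.Set Int) edge =>
        if edge.length = 2 then PySem.Set.add (PySem.Set.add t (edge.getD 0 0)) (edge.getD 1 0)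
        else t) s := by
  induction edges generalizing d s with
  | nil => rfl
  | cons e rest ih =>
    match e with
    | [] => simpa using ih d s
    | [u] => simpa using ih d s
    | [u, v] => simpa using ih _ _
    | _ :: _ :: _ :: _ => simpa using ih d s

-- the adjacency list A accumulates for a node = B's filtering re-scan
theorem fst_fold_getD (edges : List (List Int)) (d : PySem.Dict Int (List Int)) (s : PySem.Set Int) (n : Int) :
    ((edges.foldl
      (fun (p : PySem.Dict Int (List Int) × PySem.Set Int) edge =>
        match edge with
        | [u, v] => (p.1.modify u [] (· ++ [v]), PySem.Set.add (PySem.Set.add p.2 u) v)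
        | _ => p) (d, s)).1).getD n []
    = d.getD n [] ++ edges.filterMap (fun e =>
        if e.length = 2 ∧ e.getD 0 0 = n then some (e.getD 1 0) else none) := by
  induction edges generalizing d s with
  | nil => simp
  | cons e rest ih =>
    match e with
    | [] => simpa using ih d s
    | [u] => simpa using ih d s
    | [u, v] =>
      simp only [List.foldl_cons, List.filterMap_cons]
      rw [ih]
      by_cases h : u = n
      · subst h
        simp
      · simp [PySem.Dict.getD_modify, h, Ne.symm h]
    | a :: b :: c :: t => simpa using ih d s

-- 'adj[node] if node in adj else []' is just getD with default []
theorem contains_getD (d : PySem.Dict Int (List Int)) (n : Int) :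
    (if d.contains n then d.getD n [] else []) = d.getD n [] := by
  by_cases h : d.contains n = true
  · simp [h]
  · rw [PySem.Dict.contains_eq_isSome_get?] at h
    have hn : d.get? n = none := by
      cases hg : d.get? n with
      | none => rfl
      | some v => rw [hg] at h; simp at h
    simp [hn, PySem.Dict.getD]

-- ===== VERDICT (by name: the statement is the Claim_ definition above) =====
theorem edges_to_text_spec : Claim_equal_edges_to_text := by
  intro edges _
  unfold Spec_edges_to_text edges_to_text edges_to_text_alt
  simp only [snd_fold_eq]
  split
  · rfl
  · congr 1
    apply List.map_congr_left
    intro node _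
    rw [contains_getD, fst_fold_getD]
    rfl
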